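-- pv_equiv track=rewrite | github.com/TommyFurgi/WDI_2022-23 | zadania/kolos1/2020zad3.py | chess
-- ===== SOURCE A (Python) =====
-- def suma(w1,k1,w2,k2,T):
--     sum=0
--     n=len(T)
--     if w1==w2:
--         for i in range(n):
--             sum+=T[i][k1]
--             sum+=T[i][k2]
--             sum+=T[w1][i]
--         sum-=T[w1][k1]
--         sum-=T[w2][k2]
--
--     elif k1==k2:
--         for i in range(n):
--             sum+=T[i][k1]
--             sum+=T[w1][i]
--             sum+=T[w2][i]
--         sum-=T[w1][k1]
--         sum-=T[w2][k2]
--     else: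
--         for i in range(n):
--             sum+=T[w1][i]
--             sum+=T[w2][i]
--             sum+=T[i][k2]
--             sum+=T[i][k1]
--         sum-=T[w1][k2]
--         sum-=T[w2][k1]
--         sum-=T[w1][k1]
--         sum-=T[w2][k2]
--     return sum-T[w1][k1]-T[w2][k2]
--
-- def chess(T):
--     n=len(T)
--     x1=0
--     x2=0
--     y1=0
--     y2=0
--     naj=0
--     for w1 in range(n):
--         for k1 in range(n):
--             for w2 in range(n):
--                 for k2 in range(n):
--                     if w1==w2 and k1==k2:
--                         continue
--                     sum=suma(w1,k1,w2,k2,T)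
--                     if sum>naj:
--                         naj=sum
--                         x1=w1
--                         x2=w2
--                         y1=k1
--                         y2=k2
--     return (x1,y1,x2,y2),naj
-- ===== SOURCE B (Python) =====
-- def chess(T):
--     n = len(T)
--     R = [sum(T[w][i] for i in range(n)) for w in range(n)]
--     C = [sum(T[i][k] for i in range(n)) for k in range(n)]
--     best = (0, 0, 0, 0)
--     naj = 0
--     for w1 in range(n):
--         for k1 in range(n):
--             for w2 in range(n):
--                 for k2 in range(n):
--                     if w1 == w2 and k1 == k2:
--                         continue
--                     if w1 == w2:
--                         s = R[w1] + C[k1] + C[k2] - 2 * T[w1][k1] - 2 * T[w2][k2]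
--                     elif k1 == k2:
--                         s = C[k1] + R[w1] + R[w2] - 2 * T[w1][k1] - 2 * T[w2][k2]
--                     else:
--                         s = R[w1] + R[w2] + C[k1] + C[k2] \
--                             - T[w1][k2] - T[w2][k1] - 2 * T[w1][k1] - 2 * T[w2][k2]
--                     if s > naj:
--                         naj = s
--                         best = (w1, k1, w2, k2)
--     return best, naj
-- ===== Notes on version B (the rewrite author's own statement) =====
-- stated objective: faster
-- what changed: B precomputes all row sums and column sums once and evaluates each rook pair's score by an O(1) formula instead of A's suma helper that rescans the board in O(n) per pair; Pre_ excludes ragged boards with a row shorter than the board height, on which A raises IndexError except on degenerate one-row boards with an empty row, where every pair is skipped and A returns trivially while B's eager precompute still indexes the short row and raises.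
-- outside the precondition, e.g. on chess([[]]): A returns ((0, 0, 0, 0), 0), B raises IndexError
import Mathlib
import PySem

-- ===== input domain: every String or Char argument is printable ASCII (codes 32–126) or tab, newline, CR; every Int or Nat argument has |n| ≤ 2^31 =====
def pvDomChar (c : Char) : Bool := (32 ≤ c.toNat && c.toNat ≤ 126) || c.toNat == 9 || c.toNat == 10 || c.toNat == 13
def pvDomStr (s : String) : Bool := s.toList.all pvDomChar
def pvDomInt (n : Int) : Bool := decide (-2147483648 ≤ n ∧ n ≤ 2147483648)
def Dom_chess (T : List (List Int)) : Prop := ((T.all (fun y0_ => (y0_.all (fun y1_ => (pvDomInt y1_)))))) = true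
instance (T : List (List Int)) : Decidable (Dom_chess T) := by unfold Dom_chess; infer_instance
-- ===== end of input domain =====

-- B replaces A's O(n) per-pair rescanning helper `suma` by row/column sums precomputed once,
-- evaluating each pair in O(1): an asymptotic speed-up from O(n^5) to O(n^4).

-- ===== PORT A =====
-- T[w][k] under Pre_chess (every index used is 0 ≤ · < len(row)); default only pads totality
def pvGetT (T : List (List Int)) (w k : Int) : Int :=
  PySem.List.pyGetD (PySem.List.pyGetD T w []) k 0

def suma (w1 k1 w2 k2 : Int) (T : List (List Int)) : Int :=
  let n : Int := T.length
  let s :=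
    if w1 = w2 then
      ((PySem.List.pyRange 0 n 1).foldl
        (fun s i => s + pvGetT T i k1 + pvGetT T i k2 + pvGetT T w1 i) 0)
        - pvGetT T w1 k1 - pvGetT T w2 k2
    else if k1 = k2 then
      ((PySem.List.pyRange 0 n 1).foldl
        (fun s i => s + pvGetT T i k1 + pvGetT T w1 i + pvGetT T w2 i) 0)
        - pvGetT T w1 k1 - pvGetT T w2 k2
    else
      ((PySem.List.pyRange 0 n 1).foldl
        (fun s i => s + pvGetT T w1 i + pvGetT T w2 i + pvGetT T i k2 + pvGetT T i k1) 0)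
        - pvGetT T w1 k2 - pvGetT T w2 k1 - pvGetT T w1 k1 - pvGetT T w2 k2
  s - pvGetT T w1 k1 - pvGetT T w2 k2

def chess (T : List (List Int)) : (Int × Int × Int × Int) × Int :=
  let n : Int := T.length
  let r := PySem.List.pyRange 0 n 1
  let st :=
    r.foldl (fun st w1 =>
      r.foldl (fun st k1 =>
        r.foldl (fun st w2 =>
          r.foldl (fun st k2 =>
            if w1 = w2 ∧ k1 = k2 then st
            else
              let sum := suma w1 k1 w2 k2 T
              if sum > st.2 then ((w1, k1, w2, k2), sum) else st) st) st) st)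
      (((0 : Int), (0 : Int), (0 : Int), (0 : Int)), (0 : Int))
  st

-- ===== PORT B =====
def chess_alt (T : List (List Int)) : (Int × Int × Int × Int) × Int :=
  let n : Int := T.length
  let r := PySem.List.pyRange 0 n 1
  let R := r.map (fun w => (r.map (fun i => pvGetT T w i)).sum)
  let C := r.map (fun k => (r.map (fun i => pvGetT T i k)).sum)
  r.foldl (fun st w1 =>
    r.foldl (fun st k1 =>
      r.foldl (fun st w2 =>
        r.foldl (fun st k2 =>
          if w1 = w2 ∧ k1 = k2 then st
          else
            let s :=
              if w1 = w2 then
                PySem.List.pyGetD R w1 0 + PySem.List.pyGetD C k1 0 + PySem.List.pyGetD C k2 0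
                  - 2 * pvGetT T w1 k1 - 2 * pvGetT T w2 k2
              else if k1 = k2 then
                PySem.List.pyGetD C k1 0 + PySem.List.pyGetD R w1 0 + PySem.List.pyGetD R w2 0
                  - 2 * pvGetT T w1 k1 - 2 * pvGetT T w2 k2
              else
                PySem.List.pyGetD R w1 0 + PySem.List.pyGetD R w2 0
                  + PySem.List.pyGetD C k1 0 + PySem.List.pyGetD C k2 0
                  - pvGetT T w1 k2 - pvGetT T w2 k1
                  - 2 * pvGetT T w1 k1 - 2 * pvGetT T w2 k2
            if s > st.2 then ((w1, k1, w2, k2), s) else st) st) st) st)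
    (((0 : Int), (0 : Int), (0 : Int), (0 : Int)), (0 : Int))

-- ===== PRECONDITION & SPEC =====
-- Pre_ excludes ragged boards with a row shorter than len(T): there A raises IndexError, except on
-- degenerate one-row boards with an empty row, where every pair is skipped and A returns trivially while B's
-- eager row/column precompute still indexes the short row and raises.
def Pre_chess (T : List (List Int)) : Prop := ∀ row ∈ T, T.length ≤ row.length
instance (T : List (List Int)) : Decidable (Pre_chess T) := by unfold Pre_chess; infer_instance

def pvWitness_chess : List (List Int) := [[1, 2], [3, 4]]

def Spec_chess (T : List (List Int)) (out : (Int × Int × Int × Int) × Int) : Prop := out = chess_alt T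
instance (T : List (List Int)) (out : (Int × Int × Int × Int) × Int) : Decidable (Spec_chess T out) := by unfold Spec_chess; infer_instance

-- ===== CLAIM (what is proved, stated in full; the proofs are below) =====
def Claim_equal_chess : Prop := ∀ (T : List (List Int)), Dom_chess T → Pre_chess T → Spec_chess T (chess T)

-- ===== LEMMAS AND PROOFS =====

-- splitting a three-summand loop body into three independent sums
theorem foldl_add3 (a b c : Int → Int) (l : List Int) (s : Int) :
    l.foldl (fun s i => s + a i + b i + c i) s
      = s + (l.map a).sum + (l.map b).sum + (l.map c).sum := by
  induction l generalizing s with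
  | nil => simp
  | cons x xs ih => simp [List.foldl_cons, ih]; ring

theorem foldl_add4 (a b c d : Int → Int) (l : List Int) (s : Int) :
    l.foldl (fun s i => s + a i + b i + c i + d i) s
      = s + (l.map a).sum + (l.map b).sum + (l.map c).sum + (l.map d).sum := by
  induction l generalizing s with
  | nil => simp
  | cons x xs ih => simp [List.foldl_cons, ih]; ring

-- the pair-score of A equals B's O(1) formula over precomputed row/column sums
theorem suma_eq (T : List (List Int)) (w1 k1 w2 k2 : Int)
    (hw1 : 0 ≤ w1 ∧ w1 < (T.length : Int)) (hk1 : 0 ≤ k1 ∧ k1 < (T.length : Int))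
    (hw2 : 0 ≤ w2 ∧ w2 < (T.length : Int)) (hk2 : 0 ≤ k2 ∧ k2 < (T.length : Int)) :
    suma w1 k1 w2 k2 T =
      (let n : Int := T.length
       let r := PySem.List.pyRange 0 n 1
       let R := r.map (fun w => (r.map (fun i => pvGetT T w i)).sum)
       let C := r.map (fun k => (r.map (fun i => pvGetT T i k)).sum)
       if w1 = w2 then
         PySem.List.pyGetD R w1 0 + PySem.List.pyGetD C k1 0 + PySem.List.pyGetD C k2 0
           - 2 * pvGetT T w1 k1 - 2 * pvGetT T w2 k2
       else if k1 = k2 then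
         PySem.List.pyGetD C k1 0 + PySem.List.pyGetD R w1 0 + PySem.List.pyGetD R w2 0
           - 2 * pvGetT T w1 k1 - 2 * pvGetT T w2 k2
       else
         PySem.List.pyGetD R w1 0 + PySem.List.pyGetD R w2 0
           + PySem.List.pyGetD C k1 0 + PySem.List.pyGetD C k2 0
           - pvGetT T w1 k2 - pvGetT T w2 k1
           - 2 * pvGetT T w1 k1 - 2 * pvGetT T w2 k2) := by
  simp only [suma]
  rw [PySem.List.pyGetD_map_pyRange_of_nonneg _ _ _ _ hw1.1 hw1.2,
      PySem.List.pyGetD_map_pyRange_of_nonneg _ _ _ _ hw2.1 hw2.2,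
      PySem.List.pyGetD_map_pyRange_of_nonneg _ _ _ _ hk1.1 hk1.2,
      PySem.List.pyGetD_map_pyRange_of_nonneg _ _ _ _ hk2.1 hk2.2]
  split_ifs with h1 h2
  · rw [foldl_add3]; ring
  · rw [foldl_add3]; ring
  · rw [foldl_add4]; ring

-- ===== VERDICT (by name: the statement is the Claim_ definition above) =====
theorem chess_spec : Claim_equal_chess := by
  intro T _ _
  unfold Spec_chess chess chess_alt
  apply PySem.List.foldl_congr_mem
  intro st w1 hw1
  apply PySem.List.foldl_congr_mem
  intro st k1 hk1
  apply PySem.List.foldl_congr_mem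
  intro st w2 hw2
  apply PySem.List.foldl_congr_mem
  intro st k2 hk2
  rw [PySem.List.mem_pyRange_one] at hw1 hk1 hw2 hk2
  by_cases h : w1 = w2 ∧ k1 = k2
  · simp [h]
  · simp only [if_neg h]
    rw [suma_eq T w1 k1 w2 k2 hw1 hk1 hw2 hk2]
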